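-- pv_equiv track=rewrite | github.com/S-TJones/My-Intro-to-Artificial-Intelligence | Search Helper/uniform_cost.py | reform_output
-- ===== SOURCE A (Python) =====
-- def reform_output(path):
--
--     new_list = list()
--     prev = ""
--
--     for ele in path:
--         if not ele.isalpha():
--             ele = prev + ele
--             new_list = new_list[:-1]
--
--         new_list.append(ele)
--         prev = ele
--
--     return new_list
-- ===== SOURCE B (Python) =====
-- def reform_output(path):
--     # boundary-detection pass: token starts are index 0 and every alpha element
--     n = len(path)
--     starts = [i for i in range(n) if i == 0 or path[i].isalpha()]
--     # slice-and-join pass between consecutive boundaries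
--     return [''.join(path[s:e]) for s, e in zip(starts, starts[1:] + [n])]
-- ===== Notes on version B (the rewrite author's own statement) =====
-- stated objective: alternative
-- what changed: A is a single mutating pass that appends each element and on a non-alpha element pops the last entry and re-appends it merged with a tracked prev string; B instead runs two staged passes: first it collects token-start boundaries (index 0 plus every alpha index), then it slices the path between consecutive boundaries and joins each slice.
import Mathlib
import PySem

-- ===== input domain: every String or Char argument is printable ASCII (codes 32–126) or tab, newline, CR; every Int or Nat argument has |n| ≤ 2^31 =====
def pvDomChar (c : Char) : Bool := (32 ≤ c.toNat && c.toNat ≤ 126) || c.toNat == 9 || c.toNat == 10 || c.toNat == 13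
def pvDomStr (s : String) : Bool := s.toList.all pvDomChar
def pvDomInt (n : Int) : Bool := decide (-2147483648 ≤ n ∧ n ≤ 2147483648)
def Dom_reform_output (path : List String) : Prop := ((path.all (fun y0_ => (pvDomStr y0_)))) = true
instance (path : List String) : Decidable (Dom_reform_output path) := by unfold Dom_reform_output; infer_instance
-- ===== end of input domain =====

-- B replaces A's append-then-pop single mutating pass by two staged passes: a boundary-detection
-- pass collecting token-start indices (0 and every alpha index), then a slice-and-join pass; same cost, alternative structure.


-- ===== PORT A =====
-- one loop iteration of A: if ele is not alpha, ele becomes prev ++ ele and the last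
-- list entry is dropped (new_list[:-1]); then append ele and set prev := ele
def pvStepA (st : List String × String) (ele : String) : List String × String :=
  let p : String × List String :=
    if ¬ PySem.Str.strIsalpha ele then
      (st.2 ++ ele, PySem.List.slice st.1 none (some (-1)))
    else (ele, st.1)
  (p.2 ++ [p.1], p.1)

def reform_output (path : List String) : List String :=
  (path.foldl pvStepA ([], "")).1

-- ===== PORT B =====
-- Source B: boundary pass 'starts = [i for i in range(n) if i == 0 or path[i].isalpha()]',
-- then '[''.join(path[s:e]) for s, e in zip(starts, starts[1:] + [n])]'
def reform_output_alt (path : List String) : List String :=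
  let n : Int := (path.length : Int)
  let starts : List Int :=
    (PySem.List.pyRange 0 n 1).filter
      (fun i => i == 0 || PySem.Str.strIsalpha (PySem.List.pyGetD path i ""))
  (starts.zip (PySem.List.slice starts (some 1) none ++ [n])).map
    (fun p => PySem.Str.join "" (PySem.List.slice path (some p.1) (some p.2)))

-- ===== PRECONDITION & SPEC =====
def Spec_reform_output (path : List String) (out : List String) : Prop := out = reform_output_alt path
instance (path : List String) (out : List String) : Decidable (Spec_reform_output path out) := by unfold Spec_reform_output; infer_instance

-- ===== CLAIM (what is proved, stated in full; the proofs are below) =====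
def Claim_equal_reform_output : Prop := ∀ (path : List String), Dom_reform_output path → Spec_reform_output path (reform_output path)

-- ===== LEMMAS AND PROOFS =====

-- ''.join distributes over cons and over a final append
theorem strJoin_nil_cons (x : String) (s : List String) :
    PySem.Str.join "" (x :: s) = x ++ PySem.Str.join "" s := by
  apply String.toList_inj.mp
  cases s with
  | nil =>
    simp [PySem.Str.toList_join, PySem.Chars.join_nil, PySem.Chars.join_singleton]
  | cons q rest =>
    simp [PySem.Str.toList_join, PySem.Chars.join_cons_cons]

theorem strJoin_nil_singleton (x : String) : PySem.Str.join "" [x] = x := by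
  apply String.toList_inj.mp
  simp [PySem.Str.toList_join, PySem.Chars.join_singleton]

theorem strJoin_nil_append_singleton (r : List String) (x : String) :
    PySem.Str.join "" (r ++ [x]) = PySem.Str.join "" r ++ x := by
  induction r with
  | nil =>
    apply String.toList_inj.mp
    simp [PySem.Str.toList_join, PySem.Chars.join_singleton, PySem.Chars.join_nil]
  | cons y r ih =>
    rw [List.cons_append, strJoin_nil_cons, ih, strJoin_nil_cons, String.append_assoc]

-- the tokenisation A computes: an open token t absorbing non-alpha elements
def pvTok (t : String) (l : List String) : List String :=
  match l with
  | [] => [t]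
  | x :: rest =>
    if PySem.Str.strIsalpha x then t :: pvTok x rest else pvTok (t ++ x) rest

-- A's loop, started with an open last token t, produces acc ++ pvTok t l
theorem foldA_eq_tok (l : List String) (acc : List String) (t : String) :
    (l.foldl pvStepA (acc ++ [t], t)).1 = acc ++ pvTok t l := by
  induction l generalizing acc t with
  | nil => simp [pvTok]
  | cons x rest ih =>
    cases hc : PySem.Chars.strIsalpha x.toList with
    | true =>
      have hs : pvStepA (acc ++ [t], t) x = ((acc ++ [t]) ++ [x], x) := by
        simp [pvStepA, PySem.Str.strIsalpha_eq, hc]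
      rw [List.foldl_cons, hs, ih]
      simp [pvTok, PySem.Str.strIsalpha_eq, hc]
    | false =>
      have hs : pvStepA (acc ++ [t], t) x = (acc ++ [t ++ x], t ++ x) := by
        simp [pvStepA, PySem.Str.strIsalpha_eq, hc, PySem.List.slice_to_neg_one]
      rw [List.foldl_cons, hs, ih]
      simp [pvTok, PySem.Str.strIsalpha_eq, hc]

-- the run decomposition both results can be read off: an open last run r absorbing non-alpha elements
def pvRunsOf (r : List String) (l : List String) : List (List String)  :=
  match l with
  | [] => [r]
  | x :: rest =>
    if PySem.Str.strIsalpha x then r :: pvRunsOf [x] rest else pvRunsOf (r ++ [x]) rest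

-- joining each run gives the tokens of pvTok with the open run joined
theorem map_join_runsOf (l : List String) (r : List String) :
    (pvRunsOf r l).map (PySem.Str.join "") = pvTok (PySem.Str.join "" r) l := by
  induction l generalizing r with
  | nil => simp [pvRunsOf, pvTok]
  | cons x rest ih =>
    cases hc : PySem.Chars.strIsalpha x.toList with
    | true =>
      simp only [pvRunsOf, pvTok, PySem.Str.strIsalpha_eq, hc, if_pos, List.map_cons]
      rw [ih, strJoin_nil_singleton]
    | false =>
      simp only [pvRunsOf, pvTok, PySem.Str.strIsalpha_eq, hc, Bool.false_eq_true,
        ite_false]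
      rw [ih, strJoin_nil_append_singleton]

-- invariants of the runs
def pvNonAlphaTail (r : List String) : Prop :=
  ∀ x ∈ r.drop 1, PySem.Str.strIsalpha x = false

def pvRunsInv (rs : List (List String)) : Prop :=
  ∀ r ∈ rs, r ≠ [] ∧ PySem.Str.strIsalpha (r.headD "") = true ∧ pvNonAlphaTail r

theorem flatten_runsOf (l : List String) (r : List String) :
    (pvRunsOf r l).flatten = r ++ l := by
  induction l generalizing r with
  | nil => simp [pvRunsOf]
  | cons x rest ih =>
    by_cases hc : PySem.Str.strIsalpha x
    all_goals
      simp only [PySem.Str.strIsalpha_eq] at hc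
      simp [pvRunsOf, hc, ih]

theorem runsOf_shape (l : List String) (r : List String) :
    ∃ s rs', pvRunsOf r l = (r ++ s) :: rs' ∧
      (∀ x ∈ s, PySem.Str.strIsalpha x = false) ∧ pvRunsInv rs' := by
  induction l generalizing r with
  | nil => exact ⟨[], [], by simp [pvRunsOf], by simp, by simp [pvRunsInv]⟩
  | cons x rest ih =>
    by_cases hc : PySem.Str.strIsalpha x
    · have hc' : PySem.Chars.strIsalpha x.toList = true := by
        rwa [PySem.Str.strIsalpha_eq] at hc
      obtain ⟨s', rs'', heq, hs', hinv⟩ := ih [x]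
      refine ⟨[], ([x] ++ s') :: rs'', by simp [pvRunsOf, hc', heq], by simp, ?_⟩
      intro q hq
      rcases List.mem_cons.mp hq with h | h
      · subst h
        exact ⟨by simp, by simpa using hc, by simpa [pvNonAlphaTail] using hs'⟩
      · exact hinv q h
    · have hc' : PySem.Chars.strIsalpha x.toList = false := by
        rw [PySem.Str.strIsalpha_eq] at hc; simpa using hc
      obtain ⟨s', rs'', heq, hs', hinv⟩ := ih (r ++ [x])
      refine ⟨[x] ++ s', rs'', ?_, ?_, hinv⟩
      · simp only [pvRunsOf, PySem.Str.strIsalpha_eq]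
        rw [if_neg (by simp [hc']), heq]
        simp
      · intro q hq
        rcases List.mem_append.mp hq with h | h
        · simp at h; subst h; simpa using hc
        · exact hs' q h

-- partial-sum boundary positions of a runs list
def pvSums (a : ℕ) : List (List String) → List ℕ
  | [] => []
  | r :: rs => a :: pvSums (a + r.length) rs

-- reading F at an offset inside a run
theorem getD_at (F : List String) (a : ℕ) (r rest : List String)
    (h : F.drop a = r ++ rest) (j : ℕ) (hj : j < r.length) :
    F.getD (a + j) "" = r.getD j "" := by
  have h1 : F[a + j]? = (F.drop a)[j]? := (List.getElem?_drop ..).symm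
  rw [h] at h1
  have h2 : (r ++ rest)[j]? = r[j]? := List.getElem?_append_left hj
  simp [List.getD, h1, h2]

-- a segment whose head satisfies P and whose interior does not filters to its head
theorem filter_seg (P : ℕ → Bool) (a len : ℕ) (hlen : 0 < len) (hP : P a = true)
    (hint : ∀ i, a < i → i < a + len → P i = false) :
    (List.range' a len).filter P = [a] := by
  obtain ⟨k, rfl⟩ := Nat.exists_eq_succ_of_ne_zero (Nat.pos_iff_ne_zero.mp hlen)
  rw [List.range'_succ, List.filter_cons_of_pos hP]
  have : (List.range' (a + 1) k).filter P = [] := by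
    apply List.filter_eq_nil_iff.mpr
    intro i hi
    have hb := List.mem_range'_1.mp hi
    simp [hint i (by omega) (by omega)]
  rw [this]

-- the boundary filter over the segment of one interior run is its start index
theorem filter_run (F : List String) (a : ℕ) (r rest : List String)
    (ha : 0 < a) (h : F.drop a = r ++ rest)
    (hne : r ≠ []) (hhead : PySem.Str.strIsalpha (r.headD "") = true)
    (htail : pvNonAlphaTail r) :
    (List.range' a r.length).filter
      (fun i => i == 0 || PySem.Str.strIsalpha (F.getD i "")) = [a] := by
  apply filter_seg _ _ _ (by cases r <;> simp_all)
  · have h0 : F.getD a "" = r.headD "" := by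
      cases r with
      | nil => exact absurd rfl hne
      | cons y ys =>
        have hg := getD_at F a (y :: ys) rest h 0 (by simp)
        simpa using hg
    have hna : (a == 0) = false := by simp; omega
    simp only [hna, Bool.false_or, h0, hhead]
  · intro i hai hil
    have hj : F.getD i "" = r.getD (i - a) "" := by
      have := getD_at F a r rest h (i - a) (by omega)
      rwa [Nat.add_sub_cancel' (by omega)] at this
    have hmem : r.getD (i - a) "" ∈ r.drop 1 := by
      have h2 : i - a < r.length := by omega
      have he : r.getD (i - a) "" = r[i - a] := List.getD_eq_getElem r "" h2
      rw [he]
      have : r[i - a] = (r.drop 1)[i - a - 1]'(by simp; omega) := by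
        rw [List.getElem_drop]; congr 1; omega
      rw [this]; exact List.getElem_mem _
    have hv := htail _ hmem
    have hna : (i == 0) = false := by simp; omega
    simp only [hna, Bool.false_or, hj, hv]

-- the boundary filter over the whole interior equals the partial sums
theorem filter_interior (rs : List (List String)) (a : ℕ) (F : List String)
    (ha : 0 < a) (h : F.drop a = rs.flatten) (hinv : pvRunsInv rs) :
    (List.range' a rs.flatten.length).filter
      (fun i => i == 0 || PySem.Str.strIsalpha (F.getD i "")) = pvSums a rs := by
  induction rs generalizing a with
  | nil => simp [pvSums]
  | cons r rs ih =>
    obtain ⟨hne, hhead, htail⟩ := hinv r (List.mem_cons_self ..)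
    have hflat : (r :: rs).flatten = r ++ rs.flatten := by simp
    have hsplit : List.range' a (r :: rs).flatten.length =
        List.range' a r.length ++ List.range' (a + r.length) rs.flatten.length := by
      rw [hflat, List.length_append]
      simpa using (List.range'_append (s := a) (m := r.length) (n := rs.flatten.length) (step := 1)).symm
    rw [hsplit, List.filter_append]
    rw [filter_run F a r rs.flatten ha (by rw [h, hflat]) hne hhead htail]
    rw [ih (a + r.length) (by omega)
      (by rw [← List.drop_drop, h, hflat]; exact List.drop_left ..)
      (fun q hq => hinv q (List.mem_cons_of_mem _ hq))]
    rfl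

-- the full boundary filter: index 0 plus the interior boundaries
theorem filter_all (F : List String) (r0 : List String) (rs : List (List String))
    (hF : F = r0 ++ rs.flatten) (hne : r0 ≠ []) (htail : pvNonAlphaTail r0)
    (hinv : pvRunsInv rs) :
    (List.range F.length).filter
      (fun i => i == 0 || PySem.Str.strIsalpha (F.getD i "")) = pvSums 0 (r0 :: rs) := by
  have hlen : F.length = r0.length + rs.flatten.length := by rw [hF]; simp
  rw [List.range_eq_range', hlen,
    (by simpa using (List.range'_append (s := 0) (m := r0.length) (n := rs.flatten.length) (step := 1)).symm :
      List.range' 0 (r0.length + rs.flatten.length) =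
        List.range' 0 r0.length ++ List.range' (0 + r0.length) rs.flatten.length),
    List.filter_append]
  have hfirst : (List.range' 0 r0.length).filter
      (fun i => i == 0 || PySem.Str.strIsalpha (F.getD i "")) = [0] := by
    apply filter_seg _ _ _ (by cases r0 <;> simp_all) (by simp)
    intro i h0 hi
    have hj : F.getD i "" = r0.getD i "" := by
      simpa using getD_at F 0 r0 rs.flatten (by simpa using hF) i (by omega)
    have hmem : r0.getD i "" ∈ r0.drop 1 := by
      have he : r0.getD i "" = r0[i] := List.getD_eq_getElem r0 "" (by omega)
      rw [he]
      have : r0[i] = (r0.drop 1)[i - 1]'(by simp; omega) := by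
        rw [List.getElem_drop]; congr 1; omega
      rw [this]; exact List.getElem_mem _
    have hv := htail _ hmem
    have hna : (i == 0) = false := by simp; omega
    simp only [hna, Bool.false_or, hj, hv]
  rw [hfirst]
  rcases Nat.eq_zero_or_pos r0.length with h0 | h0
  · exact absurd (List.length_eq_zero_iff.mp h0) hne
  rw [filter_interior rs (0 + r0.length) F (by omega)
    (by rw [Nat.zero_add, hF]; exact List.drop_left ..) hinv]
  rfl

-- slicing between consecutive partial sums recovers the runs
theorem slices_eq_runs (rs : List (List String)) (a : ℕ) (F : List String)
    (h : F.drop a = rs.flatten) (hne : ∀ r ∈ rs, r ≠ []) :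
    ((pvSums a rs).zip ((pvSums a rs).drop 1 ++ [F.length])).map
      (fun p => (F.drop p.1).take (p.2 - p.1)) = rs := by
  induction rs generalizing a with
  | nil => simp [pvSums]
  | cons r rs ih =>
    have hra : F.drop a = r ++ rs.flatten := by simpa using h
    cases rs with
    | nil =>
      simp only [pvSums]
      have hr : F.drop a = r := by simpa using hra
      have hlen : r.length = F.length - a := by rw [← hr]; simp
      simp [hr, List.take_of_length_le (le_of_eq hlen)]
    | cons r' rs' =>
      have hstep : pvSums a (r :: r' :: rs') =
          a :: pvSums (a + r.length) (r' :: rs') := rfl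
      have hS : pvSums (a + r.length) (r' :: rs') =
          (a + r.length) :: pvSums (a + r.length + r'.length) rs' := rfl
      have hfirst : (F.drop a).take (a + r.length - a) = r := by
        rw [hra, Nat.add_sub_cancel_left]; exact List.take_left ..
      have hdrop : F.drop (a + r.length) = (r' :: rs').flatten := by
        rw [← List.drop_drop, hra]
        simpa using List.drop_left r ((r' :: rs').flatten)
      have hrest := ih (a + r.length) hdrop (fun q hq => hne q (List.mem_cons_of_mem _ hq))
      rw [hS] at hrest
      simp only [List.drop_succ_cons, List.drop_zero] at hrest
      rw [hstep, hS]
      simp only [List.drop_succ_cons, List.drop_zero, List.zip_cons_cons, List.map_cons,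
        List.cons_append]
      rw [hfirst]
      exact congrArg (r :: ·) hrest

-- nat-level restatement of B
def pvAltNat (path : List String) : List String :=
  let starts := (List.range path.length).filter
    (fun i => i == 0 || PySem.Str.strIsalpha (path.getD i ""))
  (starts.zip (starts.drop 1 ++ [path.length])).map
    (fun p => PySem.Str.join "" ((path.drop p.1).take (p.2 - p.1)))

theorem alt_eq_altNat (path : List String) : reform_output_alt path = pvAltNat path := by
  unfold reform_output_alt pvAltNat
  simp only [PySem.List.pyRange_zero_nat, PySem.List.slice_from_one]
  rw [List.filter_map]
  have hp : ((fun i => i == (0:Int) || PySem.Str.strIsalpha (PySem.List.pyGetD path i "")) ∘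
      (fun k : ℕ => (k : Int))) =
      (fun i : ℕ => i == 0 || PySem.Str.strIsalpha (path.getD i "")) := by
    funext k
    by_cases hk : k = 0
    · subst hk; simp
    · have h1 : ((k : Int) == 0) = false := by simp [hk]
      have h2 : (k == 0) = false := by simp [hk]
      simp only [Function.comp_apply, PySem.List.pyGetD_natCast, h1, h2]
  rw [hp]
  set S := (List.range path.length).filter
    (fun i : ℕ => i == 0 || PySem.Str.strIsalpha (path.getD i "")) with hS
  have htail : (S.map (fun k : ℕ => (k : Int))).tail ++ [(path.length : Int)] =
      (S.drop 1 ++ [path.length]).map (fun k : ℕ => (k : Int)) := by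
    simp [List.map_drop, ← List.drop_one]
  rw [htail, List.zip_map, List.map_map]
  apply List.map_congr_left
  intro p _
  simp [Prod.map, PySem.List.slice_natCast]

-- B's nat-level result is the joined runs
theorem altNat_eq_join_runs (x : String) (t : List String) :
    pvAltNat (x :: t) = (pvRunsOf [x] t).map (PySem.Str.join "") := by
  obtain ⟨s, rs', heq, hs, hinv⟩ := runsOf_shape t [x]
  have hflat : (x :: t) = ([x] ++ s) ++ rs'.flatten := by
    have := flatten_runsOf t [x]
    rw [heq] at this
    simpa using this.symm
  unfold pvAltNat
  rw [filter_all (x :: t) ([x] ++ s) rs' hflat (by simp)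
    (by intro q hq; exact hs q (by simpa using hq)) hinv]
  have hall : ∀ r ∈ ([x] ++ s) :: rs', r ≠ [] := by
    intro r hr
    rcases List.mem_cons.mp hr with h | h
    · subst h; simp
    · exact (hinv r h).1
  have h2 := slices_eq_runs (([x] ++ s) :: rs') 0 (x :: t) (by simpa using hflat) hall
  have h3 := congrArg (List.map (PySem.Str.join "")) h2
  rw [List.map_map] at h3
  rw [heq]
  exact h3

-- ===== VERDICT (by name: the statement is the Claim_ definition above) =====
theorem reform_output_spec : Claim_equal_reform_output := by
  intro path _
  show reform_output path = reform_output_alt path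
  cases path with
  | nil => simp [reform_output, reform_output_alt]
  | cons x rest =>
    have hA : reform_output (x :: rest) = pvTok x rest := by
      have hfirst : pvStepA (([] : List String), "") x = ([x], x) := by
        cases hc : PySem.Chars.strIsalpha x.toList with
        | true => simp [pvStepA, PySem.Str.strIsalpha_eq, hc]
        | false =>
          simp [pvStepA, PySem.Str.strIsalpha_eq, hc, PySem.List.slice_to_neg_one,
            String.empty_append]
      simp only [reform_output, List.foldl_cons, hfirst]
      simpa using foldA_eq_tok rest [] x
    rw [hA, alt_eq_altNat, altNat_eq_join_runs, map_join_runsOf, strJoin_nil_singleton]
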